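-- pv_equiv track=rewrite | github.com/LeanneNortje/MultimodalSpeech-to-ImageMatching | Few_shot_learning/generate_unimodal_image_episodes.py | filter_omniglot_set
-- ===== SOURCE A (Python) =====
-- def filter_omniglot_set(subset, subset_keys, subset_labels, M, K, Q):
--
-- 	minimum = K + 2
--
-- 	label_count = {}
--
-- 	for label in subset_labels:
-- 		if label not in label_count:
-- 			label_count[label] = 1
--
-- 		else:
-- 			label_count[label] += 1
--
-- 	valid_labels = []
--
-- 	for label in label_count:
-- 		if label_count[label] >= minimum: valid_labels.append(label)
--
-- 	updated_subset = []
-- 	updated_labels = []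
-- 	updated_keys = []
--
-- 	for i in range(len(subset_labels)):
-- 		if subset_labels[i] in valid_labels:
-- 			updated_subset.append(subset[i])
-- 			updated_keys.append(subset_keys[i])
-- 			updated_labels.append(subset_labels[i])
--
-- 	return updated_subset, updated_keys, updated_labels
-- ===== SOURCE B (Python) =====
-- def filter_omniglot_set(subset, subset_keys, subset_labels, M, K, Q):
--     minimum = K + 2
--     # sort the labels so equal labels are contiguous, then one run-length scan
--     # picks out the labels whose run is long enough -- no counting dict needed
--     valid = set()
--     run = None  # (label, run_length) of the current run, or None
--     for l in sorted(subset_labels):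
--         if run is not None and l == run[0]:
--             run = (run[0], run[1] + 1)
--         else:
--             if run is not None and run[1] >= minimum:
--                 valid.add(run[0])
--             run = (l, 1)
--     if run is not None and run[1] >= minimum:
--         valid.add(run[0])
--     out_s, out_k, out_l = [], [], []
--     for s, k, l in zip(subset, subset_keys, subset_labels):
--         if l in valid:
--             out_s.append(s)
--             out_k.append(k)
--             out_l.append(l)
--     return out_s, out_k, out_l
-- ===== Notes on version B (the rewrite author's own statement) =====
-- stated objective: alternative
-- what changed: B finds the valid labels by sorting the labels and scanning contiguous runs (a label is valid iff its run is long enough) instead of A's hash-dict counting plus a separate valid-label list, then filters the zipped triples in one pass.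
import Mathlib
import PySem

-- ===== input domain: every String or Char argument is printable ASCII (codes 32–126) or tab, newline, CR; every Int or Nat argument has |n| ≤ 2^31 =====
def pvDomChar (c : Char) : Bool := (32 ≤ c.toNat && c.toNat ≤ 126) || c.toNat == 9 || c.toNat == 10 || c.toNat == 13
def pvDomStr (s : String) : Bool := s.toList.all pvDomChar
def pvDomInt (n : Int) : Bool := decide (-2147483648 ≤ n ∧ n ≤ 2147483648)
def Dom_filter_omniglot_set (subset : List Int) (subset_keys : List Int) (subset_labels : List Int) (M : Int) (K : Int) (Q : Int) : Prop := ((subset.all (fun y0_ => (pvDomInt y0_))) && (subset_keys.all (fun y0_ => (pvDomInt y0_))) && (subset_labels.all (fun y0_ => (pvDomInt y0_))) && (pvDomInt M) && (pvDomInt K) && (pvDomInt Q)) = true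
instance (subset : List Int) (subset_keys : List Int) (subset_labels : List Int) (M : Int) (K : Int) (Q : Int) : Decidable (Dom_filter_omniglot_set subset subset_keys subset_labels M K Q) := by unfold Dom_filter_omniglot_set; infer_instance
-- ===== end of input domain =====

-- B finds valid labels by sort + run-length scan instead of A's dict counting + valid-label
-- list, then filters the zipped triples in one pass (objective: alternative algorithm).

-- ===== PORT A =====
def filter_omniglot_set (subset : List Int) (subset_keys : List Int) (subset_labels : List Int) (M : Int) (K : Int) (Q : Int) : List Int × List Int × List Int :=
  let minimum := K + 2
  let label_count : PySem.Dict Int Int :=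
    subset_labels.foldl (fun d label =>
      if d.contains label = false then d.insert label 1
      else d.modify label 0 (· + 1)) PySem.Dict.empty
  let valid_labels : List Int :=
    label_count.keys.foldl (fun acc label =>
      if minimum ≤ label_count.getD label 0 then acc ++ [label] else acc) []
  -- subset[i] / subset_keys[i]: pyGetD's default is reached only outside Pre_ (there Python raises IndexError)
  let res :=
    (PySem.List.pyRange 0 (subset_labels.length : Int) 1).foldl
      (fun (st : List Int × List Int × List Int) i =>
        if PySem.List.pyGetD subset_labels i 0 ∈ valid_labels then
          (st.1 ++ [PySem.List.pyGetD subset i 0],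
           st.2.1 ++ [PySem.List.pyGetD subset_keys i 0],
           st.2.2 ++ [PySem.List.pyGetD subset_labels i 0])
        else st) ([], [], [])
  res

-- ===== PORT B =====
-- one step of B's run-length scan over the sorted labels: state = (valid set, current run)
def pvRunStep (minimum : Int) (p : PySem.Set Int × Option (Int × Int)) (l : Int) : PySem.Set Int × Option (Int × Int) :=
  match p.2 with
  | some r =>
    if l = r.1 then (p.1, some (r.1, r.2 + 1))
    else (if minimum ≤ r.2 then PySem.Set.add p.1 r.1 else p.1, some (l, 1))
  | none => (p.1, some (l, 1))

-- the final flush of B's last run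
def pvFlush (minimum : Int) (p : PySem.Set Int × Option (Int × Int)) : PySem.Set Int :=
  match p.2 with
  | some r => if minimum ≤ r.2 then PySem.Set.add p.1 r.1 else p.1
  | none => p.1

def filter_omniglot_set_alt (subset : List Int) (subset_keys : List Int) (subset_labels : List Int) (M : Int) (K : Int) (Q : Int) : List Int × List Int × List Int :=
  let minimum := K + 2
  let valid : PySem.Set Int :=
    pvFlush minimum
      ((PySem.List.sorted subset_labels (fun x => x) false).foldl (pvRunStep minimum)
        (PySem.Set.empty, none))
  (subset.zip (subset_keys.zip subset_labels)).foldl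
    (fun (out : List Int × List Int × List Int) t =>
      if t.2.2 ∈ valid then (out.1 ++ [t.1], out.2.1 ++ [t.2.1], out.2.2 ++ [t.2.2]) else out)
    ([], [], [])

-- ===== PRECONDITION & SPEC =====
-- Pre_ holds exactly when A returns: A raises IndexError iff some label with count ≥ K+2
-- occurs at an index past the shorter of subset/subset_keys.
def Pre_filter_omniglot_set (subset : List Int) (subset_keys : List Int) (subset_labels : List Int) (M : Int) (K : Int) (Q : Int) : Prop :=
  ∀ l ∈ subset_labels.drop (min subset.length subset_keys.length),
    (subset_labels.count l : Int) < K + 2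

instance (subset : List Int) (subset_keys : List Int) (subset_labels : List Int) (M : Int) (K : Int) (Q : Int) : Decidable (Pre_filter_omniglot_set subset subset_keys subset_labels M K Q) := by unfold Pre_filter_omniglot_set; infer_instance

def pvWitness_filter_omniglot_set : List Int × List Int × List Int × Int × Int × Int :=
  ([1, 2, 3], [4, 5, 6], [7, 7, 8], 0, 0, 0)

def Spec_filter_omniglot_set (subset : List Int) (subset_keys : List Int) (subset_labels : List Int) (M : Int) (K : Int) (Q : Int) (out : List Int × List Int × List Int) : Prop := out = filter_omniglot_set_alt subset subset_keys subset_labels M K Q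
instance (subset : List Int) (subset_keys : List Int) (subset_labels : List Int) (M : Int) (K : Int) (Q : Int) (out : List Int × List Int × List Int) : Decidable (Spec_filter_omniglot_set subset subset_keys subset_labels M K Q out) := by unfold Spec_filter_omniglot_set; infer_instance

-- ===== CLAIM (what is proved, stated in full; the proofs are below) =====
def Claim_equal_filter_omniglot_set : Prop := ∀ (subset : List Int) (subset_keys : List Int) (subset_labels : List Int) (M : Int) (K : Int) (Q : Int), Dom_filter_omniglot_set subset subset_keys subset_labels M K Q → Pre_filter_omniglot_set subset subset_keys subset_labels M K Q → Spec_filter_omniglot_set subset subset_keys subset_labels M K Q (filter_omniglot_set subset subset_keys subset_labels M K Q)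

-- ===== LEMMAS AND PROOFS =====

theorem pv_filter_nil (P : Int → Bool) (ls : List Int) (h : ∀ l ∈ ls, P l = false) :
    (List.range ls.length).filter (fun i => P (ls.getD i 0)) = [] := by
  apply List.filter_eq_nil_iff.mpr
  intro i hi
  rw [List.mem_range] at hi
  rw [List.getD_eq_getElem ls 0 hi, h _ (ls.getElem_mem hi)]
  simp

theorem pv_zipsel (P : Int → Bool) :
    ∀ (ls xs ys : List Int),
    (∀ l ∈ ls.drop (min xs.length ys.length), P l = false) →
    (((List.range ls.length).filter (fun i => P (ls.getD i 0))).map (fun i => xs.getD i 0)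
      = ((xs.zip (ys.zip ls)).filter (fun t => P t.2.2)).map (fun t => t.1))
    ∧ (((List.range ls.length).filter (fun i => P (ls.getD i 0))).map (fun i => ys.getD i 0)
      = ((xs.zip (ys.zip ls)).filter (fun t => P t.2.2)).map (fun t => t.2.1))
    ∧ (((List.range ls.length).filter (fun i => P (ls.getD i 0))).map (fun i => ls.getD i 0)
      = ((xs.zip (ys.zip ls)).filter (fun t => P t.2.2)).map (fun t => t.2.2)) := by
  intro ls
  induction ls with
  | nil => intro xs ys h; simp
  | cons l ls ih =>
    intro xs ys h
    match xs, ys with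
    | [], _ =>
      simp only [List.length_nil, Nat.min_comm, Nat.min_zero, List.drop_zero] at h
      rw [pv_filter_nil P (l :: ls) h]
      simp
    | x :: xs', [] =>
      simp only [List.length_nil, Nat.min_zero, List.drop_zero] at h
      rw [pv_filter_nil P (l :: ls) h]
      simp
    | x :: xs', y :: ys' =>
      have h' : ∀ a ∈ ls.drop (min xs'.length ys'.length), P a = false := by
        intro a ha
        apply h
        simp only [List.length_cons, Nat.succ_min_succ, List.drop_succ_cons]
        exact ha
      obtain ⟨ih1, ih2, ih3⟩ := ih xs' ys' h'
      cases hp : P l <;>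
        simp only [List.length_cons, List.range_succ_eq_map, List.zip_cons_cons,
          List.filter_cons, List.getD_cons_zero, hp, Bool.false_eq_true, if_false, if_true,
          List.map_cons, List.filter_map, List.map_map, Function.comp_def,
          Nat.succ_eq_add_one, List.getD_cons_succ]
      · exact ⟨ih1, ih2, ih3⟩
      · exact ⟨congrArg _ ih1, congrArg _ ih2, congrArg _ ih3⟩

theorem pv_countA (ls : List Int) :
    ls.foldl (fun d label =>
      if d.contains label = false then d.insert label 1
      else d.modify label 0 (· + 1)) PySem.Dict.empty = PySem.Dict.counter ls := by
  rw [PySem.Dict.counter_eq_foldl]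
  refine PySem.List.foldl_congr_mem _ _ _ _ ?_
  intro d l _
  cases hc : d.contains l
  · have h0 : d.getD l 0 = 0 := PySem.Dict.getD_of_not_contains d 0 hc
    simp [PySem.Dict.modify, h0]
  · simp

theorem pv_split {α : Type} (q : α → Prop) [DecidablePred q] (f1 f2 f3 : α → Int) (r : List α) :
    r.foldl (fun (st : List Int × List Int × List Int) i =>
        if q i then (st.1 ++ [f1 i], st.2.1 ++ [f2 i], st.2.2 ++ [f3 i]) else st)
      ([], [], []) =
    ((r.filter (fun i => decide (q i))).map f1,
     (r.filter (fun i => decide (q i))).map f2,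
     (r.filter (fun i => decide (q i))).map f3) := by
  have hcg := PySem.List.foldl_congr_mem r
    (fun (st : List Int × List Int × List Int) i =>
      if q i then (st.1 ++ [f1 i], st.2.1 ++ [f2 i], st.2.2 ++ [f3 i]) else st)
    (fun (st : List Int × List Int × List Int) i =>
      (if q i then st.1 ++ [f1 i] else st.1,
       if q i then st.2.1 ++ [f2 i] else st.2.1,
       if q i then st.2.2 ++ [f3 i] else st.2.2))
    (([], [], []) : List Int × List Int × List Int)
    (by intro acc x _; by_cases hq : q x <;> simp [hq])
  rw [hcg,
    PySem.List.foldl_prod_mk (f := fun (a : List Int) i => if q i then a ++ [f1 i] else a)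
      (g := fun (b : List Int × List Int) i =>
        (if q i then b.1 ++ [f2 i] else b.1, if q i then b.2 ++ [f3 i] else b.2)),
    PySem.List.foldl_prod_mk (f := fun (a : List Int) i => if q i then a ++ [f2 i] else a)
      (g := fun (a : List Int) i => if q i then a ++ [f3 i] else a),
    PySem.List.foldl_append_ite q f1, PySem.List.foldl_append_ite q f2,
    PySem.List.foldl_append_ite q f3]
  simp

-- membership in B's run-scan result, generalized over the mid-run state
theorem pv_run_mem (m : Int) :
    ∀ (s : List Int) (V : PySem.Set Int) (a : Int) (n : Int),
    s.Pairwise (· ≤ ·) → (∀ y ∈ s, a ≤ y) →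
    ∀ x, x ∈ pvFlush m (s.foldl (pvRunStep m) (V, some (a, n))) ↔
      (x ∈ V ∨ (x = a ∧ m ≤ n + (s.count a : Int)) ∨ (x ≠ a ∧ x ∈ s ∧ m ≤ (s.count x : Int))) := by
  intro s
  induction s with
  | nil =>
    intro V a n _ _ x
    simp only [List.foldl_nil, pvFlush, List.count_nil, List.not_mem_nil]
    split_ifs with hm
    · simp [PySem.Set.mem_add]; tauto
    · simp only [Int.natCast_zero, add_zero]
      constructor
      · tauto
      · rintro (h | ⟨rfl, h⟩ | ⟨_, h, _⟩) <;> tauto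
  | cons b t ih =>
    intro V a n hp hle x
    have ht : t.Pairwise (· ≤ ·) := hp.of_cons
    have hb : ∀ y ∈ t, b ≤ y := fun y hy => List.rel_of_pairwise_cons hp hy
    have hab : a ≤ b := hle b (List.mem_cons_self)
    rw [List.foldl_cons]
    by_cases hba : b = a
    · subst hba
      have hstep : pvRunStep m (V, some (b, n)) b = (V, some (b, n + 1)) := by
        simp [pvRunStep]
      rw [hstep, ih V b (n + 1) ht hb x]
      simp only [List.count_cons_self, List.mem_cons]
      constructor
      · rintro (h | ⟨rfl, h⟩ | ⟨h1, h2, h3⟩)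
        · tauto
        · refine Or.inr (Or.inl ⟨rfl, ?_⟩); push_cast; push_cast at h; omega
        · exact Or.inr (Or.inr ⟨h1, Or.inr h2, by rwa [List.count_cons_of_ne (Ne.symm h1)]⟩)
      · rintro (h | ⟨rfl, h⟩ | ⟨h1, h2, h3⟩)
        · tauto
        · refine Or.inr (Or.inl ⟨rfl, ?_⟩); push_cast; push_cast at h; omega
        · refine Or.inr (Or.inr ⟨h1, ?_, ?_⟩)
          · rcases h2 with h2 | h2; · exact absurd h2 h1
            exact h2
          · rwa [List.count_cons_of_ne (Ne.symm h1)] at h3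
    · have halt : a < b := lt_of_le_of_ne hab (fun h => hba h.symm)
      have hnat : a ∉ t := fun hmem => absurd (hb a hmem) (by omega)
      have hstep : pvRunStep m (V, some (a, n)) b
          = (if m ≤ n then PySem.Set.add V a else V, some (b, 1)) := by
        simp [pvRunStep, hba]
      rw [hstep, ih _ b 1 ht hb x]
      have hVmem : x ∈ (if m ≤ n then PySem.Set.add V a else V) ↔ (x ∈ V ∨ (x = a ∧ m ≤ n)) := by
        split_ifs with hm
        · simp [PySem.Set.mem_add]; tauto
        · constructor
          · tauto
          · rintro (h | ⟨rfl, h⟩) <;> tauto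
      rw [hVmem]
      have hcount_a : (b :: t).count a = 0 := by
        rw [List.count_cons_of_ne hba, List.count_eq_zero]
        exact hnat
      constructor
      · rintro ((h | ⟨rfl, h⟩) | ⟨rfl, h⟩ | ⟨h1, h2, h3⟩)
        · tauto
        · refine Or.inr (Or.inl ⟨rfl, ?_⟩); rw [hcount_a]; push_cast; omega
        · refine Or.inr (Or.inr ⟨hba, List.mem_cons_self, ?_⟩)
          rw [List.count_cons_self]; push_cast; push_cast at h; omega
        · have hxa : x ≠ a := fun h => hnat (h ▸ h2)
          refine Or.inr (Or.inr ⟨hxa, List.mem_cons_of_mem _ h2, ?_⟩)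
          rwa [List.count_cons_of_ne (Ne.symm h1)]
      · rintro (h | ⟨rfl, h⟩ | ⟨h1, h2, h3⟩)
        · tauto
        · rw [hcount_a] at h; push_cast at h
          exact Or.inl (Or.inr ⟨rfl, by omega⟩)
        · by_cases hxb : x = b
          · subst hxb
            rw [List.count_cons_self] at h3; push_cast at h3
            exact Or.inr (Or.inl ⟨rfl, by omega⟩)
          · rcases List.mem_cons.mp h2 with h2 | h2; · exact absurd h2 hxb
            refine Or.inr (Or.inr ⟨hxb, h2, ?_⟩)
            rwa [List.count_cons_of_ne (Ne.symm hxb)] at h3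

-- B's valid set holds exactly the labels occurring at least m times
theorem pv_valid_mem (labels : List Int) (m : Int) (x : Int) :
    x ∈ pvFlush m ((PySem.List.sorted labels (fun y => y) false).foldl (pvRunStep m)
        (PySem.Set.empty, none)) ↔
      (x ∈ labels ∧ m ≤ (labels.count x : Int)) := by
  have hperm : (PySem.List.sorted labels (fun y => y) false).Perm labels :=
    PySem.List.sorted_perm labels (fun y => y) false
  have hpw : (PySem.List.sorted labels (fun y => y) false).Pairwise (· ≤ ·) :=
    PySem.List.sorted_pairwise labels (fun y => y)
  rcases hs : PySem.List.sorted labels (fun y => y) false with _ | ⟨a, t⟩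
  · have : labels = [] := by
      have := hperm; rw [hs] at this; exact this.nil_eq.symm
    subst this
    simp [pvFlush]
  · rw [hs] at hperm hpw
    have ht : t.Pairwise (· ≤ ·) := hpw.of_cons
    have ha : ∀ y ∈ t, a ≤ y := fun y hy => List.rel_of_pairwise_cons hpw hy
    have hstep : pvRunStep m (PySem.Set.empty, none) a = (PySem.Set.empty, some (a, 1)) := rfl
    rw [List.foldl_cons, hstep, pv_run_mem m t PySem.Set.empty a 1 ht ha x]
    have hcnt : labels.count x = (a :: t).count x := (hperm.count_eq x).symm
    have hmem : x ∈ labels ↔ x ∈ a :: t := ⟨fun h => hperm.mem_iff.mpr h, fun h => hperm.mem_iff.mp h⟩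
    rw [hcnt, hmem]
    constructor
    · rintro (h | ⟨rfl, h⟩ | ⟨h1, h2, h3⟩)
      · simp [PySem.Set.empty] at h
      · refine ⟨List.mem_cons_self, ?_⟩
        rw [List.count_cons_self]; push_cast; push_cast at h; omega
      · exact ⟨List.mem_cons_of_mem _ h2, by rwa [List.count_cons_of_ne (Ne.symm h1)]⟩
    · rintro ⟨h1, h2⟩
      by_cases hxa : x = a
      · subst hxa
        rw [List.count_cons_self] at h2; push_cast at h2
        exact Or.inr (Or.inl ⟨rfl, by push_cast; omega⟩)
      · rcases List.mem_cons.mp h1 with h1 | h1; · exact absurd h1 hxa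
        refine Or.inr (Or.inr ⟨hxa, h1, ?_⟩)
        rwa [List.count_cons_of_ne (Ne.symm hxa)] at h2

theorem filter_omniglot_set_spec : Claim_equal_filter_omniglot_set := by
  intro subset subset_keys subset_labels M K Q _ hPre
  unfold Spec_filter_omniglot_set
  simp only [filter_omniglot_set, filter_omniglot_set_alt]
  rw [pv_countA,
    PySem.List.foldl_append_ite_eq_filter
      (fun label => K + 2 ≤ (PySem.Dict.counter subset_labels).getD label 0),
    List.nil_append, pv_split, pv_split]
  -- the valid-labels list of A
  set V : List Int := (PySem.Dict.counter subset_labels).keys.filter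
    (fun x => decide (K + 2 ≤ (PySem.Dict.counter subset_labels).getD x 0)) with hV
  have hvmem : ∀ v ∈ subset_labels, (v ∈ V ↔ K + 2 ≤ (subset_labels.count v : Int)) := by
    intro v hv
    rw [hV, List.mem_filter]
    simp [PySem.Dict.keys_counter, PySem.Dict.getD_counter, PySem.Set.mem_ofList, hv]
  -- normalize A's index lists to List.range form
  rw [PySem.List.pyRange_zero_nat]
  simp only [List.filter_map, List.map_map, Function.comp_def, PySem.List.pyGetD_natCast]
  -- B's filter predicate agrees with membership in V on the zipped triples
  have hfB : (subset.zip (subset_keys.zip subset_labels)).filter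
      (fun t => decide (t.2.2 ∈ pvFlush (K + 2)
        ((PySem.List.sorted subset_labels (fun x => x) false).foldl (pvRunStep (K + 2))
          (PySem.Set.empty, none))))
      = (subset.zip (subset_keys.zip subset_labels)).filter
      (fun t => decide (t.2.2 ∈ V)) := by
    apply List.filter_congr
    intro t ht
    have h2 : t.2.2 ∈ subset_labels :=
      (List.of_mem_zip ((List.of_mem_zip ht).2)).2
    simp only [decide_eq_decide]
    rw [pv_valid_mem, hvmem t.2.2 h2]
    tauto
  rw [hfB]
  have hdrop : ∀ l ∈ subset_labels.drop (min subset.length subset_keys.length),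
      (fun v => decide (v ∈ V)) l = false := by
    intro l hl
    have hmem : l ∈ subset_labels := List.mem_of_mem_drop hl
    have := hPre l hl
    simp only [decide_eq_false_iff_not]
    rw [hvmem l hmem]
    omega
  obtain ⟨e1, e2, e3⟩ := pv_zipsel (fun v => decide (v ∈ V)) subset_labels subset subset_keys hdrop
  exact Prod.ext e1 (Prod.ext e2 e3)
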